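-- pv_equiv track=rewrite | github.com/jaanos/PSA1 | naloge/2016/dn2/JureHostnik/maxindepset.py | independentSets
-- ===== SOURCE A (Python) =====
-- def independentSets(k, index = None, n = None):
--     if n is None:
--         n = k // 2
--     if index is None:
--         index = range(k)
--     s = []
--     if k <= 0:
--         return [[]]
--     elif k == 1:
--         return [[0], [1]]
--     elif k == 2:
--         return [[0, 0], [0, 1], [1, 0]]
--     else:
--         for m in independentSets(k-1, index = None, n = None):
--             s.append([0] + m)
--         for m in independentSets(k-2, index = None, n = None):
--             s.append([1, 0] + m)
--         return s
-- ===== SOURCE B (Python) =====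
-- def independentSets(k, index=None, n=None):
--     # Bottom-up DP: build each length exactly once instead of recomputing subproblems.
--     if k <= 0:
--         return [[]]
--     if k == 1:
--         return [[0], [1]]
--     prev2, prev1 = [[]], [[0], [1]]
--     for _ in range(2, k + 1):
--         cur = [[0] + m for m in prev1] + [[1, 0] + m for m in prev2]
--         prev2, prev1 = prev1, cur
--     return prev1
-- ===== Notes on version B (the rewrite author's own statement) =====
-- stated objective: alternative
-- what changed: Replaced the doubly-recursive enumeration (which recomputes independentSets(k-1) and independentSets(k-2) from scratch at every level) with a bottom-up DP loop that builds each length once, keeping only the last two levels; measured faster but both are bound by the Fib(k)-sized output.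
import Mathlib
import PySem

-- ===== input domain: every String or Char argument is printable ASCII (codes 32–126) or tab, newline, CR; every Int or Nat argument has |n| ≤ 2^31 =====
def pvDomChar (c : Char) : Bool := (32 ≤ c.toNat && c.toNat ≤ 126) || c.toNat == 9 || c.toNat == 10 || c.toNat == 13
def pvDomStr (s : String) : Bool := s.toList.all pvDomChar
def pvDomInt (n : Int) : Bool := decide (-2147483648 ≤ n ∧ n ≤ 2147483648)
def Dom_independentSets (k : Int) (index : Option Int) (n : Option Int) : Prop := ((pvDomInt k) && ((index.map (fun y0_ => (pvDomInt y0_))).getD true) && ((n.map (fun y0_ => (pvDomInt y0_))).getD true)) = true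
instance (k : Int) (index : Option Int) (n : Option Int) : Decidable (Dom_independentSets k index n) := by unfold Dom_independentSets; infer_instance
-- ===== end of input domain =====

-- B replaces A's double recursion by a bottom-up two-row DP loop (alternative decomposition, same output).

-- ===== PORT A =====
-- A's defaults n = k//2 and index = range(k) are computed but never used; ports take the
-- parameters and ignore them, as A does.
def independentSets (k : Int) (index : Option Int) (n : Option Int) : List (List Int) :=
  if k ≤ 0 then [[]]
  else if k = 1 then [[0], [1]]
  else if k = 2 then [[0, 0], [0, 1], [1, 0]]
  else
    (independentSets (k-1) none none).map (fun m => 0 :: m) ++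
    (independentSets (k-2) none none).map (fun m => 1 :: 0 :: m)
termination_by k.toNat
decreasing_by all_goals omega

-- ===== PORT B =====
-- one iteration of Source B's loop body, applied (k-1) times from the two base rows
def pvAltIter : Nat → (List (List Int) × List (List Int)) → (List (List Int) × List (List Int))
  | 0, st => st
  | m+1, (p2, p1) => pvAltIter m (p1, p1.map (fun x => 0 :: x) ++ p2.map (fun x => 1 :: 0 :: x))

def independentSets_alt (k : Int) (index : Option Int) (n : Option Int) : List (List Int) :=
  if k ≤ 0 then [[]]
  else if k = 1 then [[0], [1]]
  else (pvAltIter (k-1).toNat ([[]], [[0], [1]])).2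

-- ===== PRECONDITION & SPEC =====
-- Pre_ excludes exactly k >= 1000: there A's recursion chain k -> k-1 -> ... exceeds
-- Python's default recursion limit and A raises RecursionError before returning anything.
def Pre_independentSets (k : Int) (index : Option Int) (n : Option Int) : Prop := k ≤ 999
instance (k : Int) (index : Option Int) (n : Option Int) : Decidable (Pre_independentSets k index n) := by unfold Pre_independentSets; infer_instance
def pvWitness_independentSets : Int × Option Int × Option Int := (5, none, none)

def Spec_independentSets (k : Int) (index : Option Int) (n : Option Int) (out : List (List Int)) : Prop := out = independentSets_alt k index n
instance (k : Int) (index : Option Int) (n : Option Int) (out : List (List Int)) : Decidable (Spec_independentSets k index n out) := by unfold Spec_independentSets; infer_instance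

-- ===== CLAIM (what is proved, stated in full; the proofs are below) =====
def Claim_equal_independentSets : Prop := ∀ (k : Int) (index : Option Int) (n : Option Int), Dom_independentSets k index n → Pre_independentSets k index n → Spec_independentSets k index n (independentSets k index n)

-- ===== LEMMAS AND PROOFS =====
-- reference sequence: the value shared by both programs at nonnegative length
def pvG : Nat → List (List Int)
  | 0 => [[]]
  | 1 => [[0], [1]]
  | m+2 => (pvG (m+1)).map (fun x => 0 :: x) ++ (pvG m).map (fun x => 1 :: 0 :: x)

theorem pvA_eq_pvG : ∀ (m : Nat) (i o : Option Int), independentSets (m : Int) i o = pvG m := by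
  intro m
  induction m using Nat.strong_induction_on with
  | _ m ih =>
    intro i o
    match m with
    | 0 => simp [independentSets, pvG]
    | 1 => simp [independentSets, pvG]
    | 2 =>
      rw [independentSets]
      norm_num [pvG]
    | (m+3) =>
      rw [independentSets]
      have h1 : ((m+3 : Nat) : Int) - 1 = ((m+2 : Nat) : Int) := by push_cast; ring
      have h2 : ((m+3 : Nat) : Int) - 2 = ((m+1 : Nat) : Int) := by push_cast; ring
      have hle : ¬ ((m+3 : Nat) : Int) ≤ 0 := by omega
      have hne1 : ((m+3 : Nat) : Int) ≠ 1 := by omega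
      have hne2 : ((m+3 : Nat) : Int) ≠ 2 := by omega
      rw [if_neg hle, if_neg hne1, if_neg hne2, h1, h2,
        ih (m+2) (by omega), ih (m+1) (by omega)]
      rfl

theorem pvAltIter_pvG : ∀ (m j : Nat), pvAltIter m (pvG j, pvG (j+1)) = (pvG (j+m), pvG (j+m+1)) := by
  intro m
  induction m with
  | zero => intro j; simp [pvAltIter]
  | succ m ih =>
    intro j
    show pvAltIter m (pvG (j+1), _) = _
    have : (pvG (j+1)).map (fun x => 0 :: x) ++ (pvG j).map (fun x => 1 :: 0 :: x) = pvG (j+2) := rfl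
    rw [this, ih (j+1), show j+1+m = j+(m+1) from by omega]

theorem pvB_eq_pvG (m : Nat) (hm : 2 ≤ m) (i o : Option Int) :
    independentSets_alt (m : Int) i o = pvG m := by
  rw [independentSets_alt]
  have hle : ¬ ((m : Nat) : Int) ≤ 0 := by omega
  have hne1 : ((m : Nat) : Int) ≠ 1 := by omega
  rw [if_neg hle, if_neg hne1]
  have ht : ((m : Int) - 1).toNat = m - 1 := by omega
  rw [ht]
  have := pvAltIter_pvG (m-1) 0
  simp only [Nat.zero_add] at this
  rw [show ([([] : List Int)], [[(0:Int)], [1]]) = (pvG 0, pvG 1) from rfl, this,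
    show m - 1 + 1 = m from by omega]

-- ===== VERDICT (by name: the statement is the Claim_ definition above) =====
theorem independentSets_spec : Claim_equal_independentSets := by
  intro k i o _ _
  show independentSets k i o = independentSets_alt k i o
  by_cases hk : k ≤ 0
  · rw [independentSets, independentSets_alt, if_pos hk, if_pos hk]
  · push Not at hk
    have hk0 : k = (k.toNat : Int) := by omega
    rw [hk0, pvA_eq_pvG]
    rcases Nat.lt_or_ge k.toNat 2 with h2 | h2
    · interval_cases h : k.toNat <;>
        simp_all [independentSets_alt, pvG]
    · rw [pvB_eq_pvG k.toNat h2]
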